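-- pv_equiv track=rewrite | github.com/arkongk/molecular-parser | molecular_parser/analysis.py | _sanitize_sequence
-- ===== SOURCE A (Python) =====
-- def _sanitize_sequence(raw_sequence: str) -> tuple[str, list[str]]:
--     sequence = raw_sequence.upper()
--     notes: list[str] = []
--
--     if any(character.isspace() for character in sequence):
--         sequence = "".join(character for character in sequence if not character.isspace())
--
--     gap_characters = {"-", "."}
--     if any(character in gap_characters for character in sequence):
--         sequence = "".join(character for character in sequence if character not in gap_characters)
--         notes.append("Gap characters were removed before analysis.")
--
--     return sequence, notes
-- ===== SOURCE B (Python) =====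
-- def _sanitize_sequence(raw_sequence: str) -> tuple[str, list[str]]:
--     kept = []
--     saw_gap = False
--     for character in raw_sequence.upper():
--         if character.isspace():
--             continue
--         if character in ("-", "."):
--             saw_gap = True
--             continue
--         kept.append(character)
--     notes = ["Gap characters were removed before analysis."] if saw_gap else []
--     return "".join(kept), notes
-- ===== Notes on version B (the rewrite author's own statement) =====
-- stated objective: simpler
-- what changed: Replaces A's four scans (two any-checks plus two rebuilding comprehensions in sequence) with a single accumulating loop that skips whitespace, skips gap characters while setting a flag, and derives the note from the flag.
import Mathlib
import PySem

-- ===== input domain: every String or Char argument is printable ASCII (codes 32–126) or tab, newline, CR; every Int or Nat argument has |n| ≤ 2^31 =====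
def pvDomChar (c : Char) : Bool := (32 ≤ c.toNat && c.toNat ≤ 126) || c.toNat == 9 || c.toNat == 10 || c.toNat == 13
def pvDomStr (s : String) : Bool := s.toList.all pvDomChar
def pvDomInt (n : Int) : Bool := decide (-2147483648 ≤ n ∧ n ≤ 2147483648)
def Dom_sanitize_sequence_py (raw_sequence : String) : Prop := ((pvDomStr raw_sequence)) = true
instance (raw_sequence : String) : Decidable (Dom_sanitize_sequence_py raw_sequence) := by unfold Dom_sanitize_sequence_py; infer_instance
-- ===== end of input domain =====

-- B replaces A's four scans (two any-checks plus two rebuilding comprehensions) with one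
-- accumulating pass that keeps characters and tracks a saw-gap flag: simpler, same cost.

-- ===== PORT A =====
def sanitize_sequence_py (raw_sequence : String) : String × List String :=
  let sequence := PySem.Str.upper raw_sequence
  let notes : List String := []
  let sequence :=
    if sequence.toList.any (fun c => PySem.Chars.isspace c) then
      String.ofList (sequence.toList.filter (fun c => !PySem.Chars.isspace c))
    else sequence
  -- gap_characters = {"-", "."}; membership of a 1-char string ported as char membership
  if sequence.toList.any (fun c => c == '-' || c == '.') then
    (String.ofList (sequence.toList.filter (fun c => !(c == '-' || c == '.'))),
     notes ++ ["Gap characters were removed before analysis."])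
  else (sequence, notes)

-- ===== PORT B =====
-- the body of B's single for-loop
def pvStep (acc : List Char × Bool) (c : Char) : List Char × Bool :=
  if PySem.Chars.isspace c then acc
  else if c == '-' || c == '.' then (acc.1, true)
  else (acc.1 ++ [c], acc.2)

def sanitize_sequence_py_alt (raw_sequence : String) : String × List String :=
  let p := (PySem.Str.upper raw_sequence).toList.foldl pvStep ([], false)
  (String.ofList p.1, if p.2 then ["Gap characters were removed before analysis."] else [])

-- ===== PRECONDITION & SPEC =====
def Spec_sanitize_sequence_py (raw_sequence : String) (out : String × List String) : Prop := out = sanitize_sequence_py_alt raw_sequence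
instance (raw_sequence : String) (out : String × List String) : Decidable (Spec_sanitize_sequence_py raw_sequence out) := by unfold Spec_sanitize_sequence_py; infer_instance

-- ===== CLAIM (what is proved, stated in full; the proofs are below) =====
def Claim_equal_sanitize_sequence_py : Prop := ∀ (raw_sequence : String), Dom_sanitize_sequence_py raw_sequence → Spec_sanitize_sequence_py raw_sequence (sanitize_sequence_py raw_sequence)

-- ===== LEMMAS AND PROOFS =====

-- B's fold, characterised: the kept chars are a single filter, the flag is an any.
theorem pvFold_char (l : List Char) (acc : List Char) (b : Bool) :
    l.foldl pvStep (acc, b)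
    = (acc ++ l.filter (fun c => !PySem.Chars.isspace c && !(c == '-' || c == '.')),
       b || l.any (fun c => !PySem.Chars.isspace c && (c == '-' || c == '.'))) := by
  induction l generalizing acc b with
  | nil => simp
  | cons c l ih =>
    rw [List.foldl_cons]
    by_cases hs : PySem.Chars.isspace c = true
    · rw [show pvStep (acc, b) c = (acc, b) by simp [pvStep, hs]]
      rw [ih]; simp [hs]
    · by_cases hg : (c == '-' || c == '.') = true
      · rw [show pvStep (acc, b) c = (acc, true) by simp [pvStep, hs, hg]]
        rw [ih, List.filter_cons_of_neg (by simp [hg]), List.any_cons]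
        simp [hs, hg]
      · rw [show pvStep (acc, b) c = (acc ++ [c], b) by simp [pvStep, hs, hg]]
        rw [ih, List.filter_cons_of_pos (by simp [hs, hg]), List.any_cons]
        simp [hs, hg]

theorem pvFilter_id {p : Char → Bool} (l : List Char) (h : l.any p = false) :
    l.filter (fun c => !p c) = l := by
  refine List.filter_eq_self.mpr (fun c hc => ?_)
  simp only [List.any_eq_false] at h
  simp [h c hc]

theorem pvAny_congr {p q : Char → Bool} (l : List Char) (h : ∀ c ∈ l, p c = q c) :
    l.any p = l.any q := by
  induction l with
  | nil => rfl
  | cons c l ih =>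
    simp [h c (List.mem_cons_self), ih (fun c hc => h c (List.mem_cons_of_mem _ hc))]

theorem pvAny_filter (p q : Char → Bool) (l : List Char) :
    (l.filter p).any q = l.any (fun c => p c && q c) := by
  induction l with
  | nil => rfl
  | cons c l ih => by_cases h : p c = true <;> simp [h, ih]

-- the second half of A, on a list already free of whitespace
theorem pvCore (m : List Char) (hm : m.any (fun c => PySem.Chars.isspace c) = false) :
    (if m.any (fun c => c == '-' || c == '.') then
      (String.ofList (m.filter (fun c => !(c == '-' || c == '.'))),
       ([] : List String) ++ ["Gap characters were removed before analysis."])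
    else (String.ofList m, ([] : List String)))
    = (String.ofList (m.filter (fun c => !PySem.Chars.isspace c && !(c == '-' || c == '.'))),
       if m.any (fun c => !PySem.Chars.isspace c && (c == '-' || c == '.')) then
         ["Gap characters were removed before analysis."] else []) := by
  have hpt : ∀ c ∈ m, PySem.Chars.isspace c = false := by
    simpa [List.any_eq_false] using hm
  have hfe : m.filter (fun c => !PySem.Chars.isspace c && !(c == '-' || c == '.'))
      = m.filter (fun c => !(c == '-' || c == '.')) :=
    List.filter_congr (fun c hc => by simp [hpt c hc])
  have hae : m.any (fun c => !PySem.Chars.isspace c && (c == '-' || c == '.'))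
      = m.any (fun c => c == '-' || c == '.') :=
    pvAny_congr m (fun c hc => by simp [hpt c hc])
  rw [hfe, hae]
  by_cases hg : m.any (fun c => c == '-' || c == '.') = true
  · simp [hg]
  · have hgf : m.any (fun c => c == '-' || c == '.') = false := by simpa using hg
    rw [if_neg hg, if_neg hg, pvFilter_id m hgf]

-- A's value, in B's normal form
theorem pvA_eq (raw_sequence : String) :
    sanitize_sequence_py raw_sequence
    = (String.ofList ((PySem.Str.upper raw_sequence).toList.filter
         (fun c => !PySem.Chars.isspace c && !(c == '-' || c == '.'))),
       if (PySem.Str.upper raw_sequence).toList.any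
            (fun c => !PySem.Chars.isspace c && (c == '-' || c == '.'))
       then ["Gap characters were removed before analysis."] else []) := by
  unfold sanitize_sequence_py
  simp only []
  by_cases hs : (PySem.Str.upper raw_sequence).toList.any (fun c => PySem.Chars.isspace c) = true
  · simp only [hs, if_true, String.toList_ofList]
    have hm : ((PySem.Str.upper raw_sequence).toList.filter
        (fun c => !PySem.Chars.isspace c)).any (fun c => PySem.Chars.isspace c) = false := by
      rw [pvAny_filter]
      exact List.any_eq_false.mpr (fun c _ => by cases PySem.Chars.isspace c <;> simp)
    rw [pvCore _ hm]
    have e1 : ((PySem.Str.upper raw_sequence).toList.filter (fun c => !PySem.Chars.isspace c)).filter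
          (fun c => !PySem.Chars.isspace c && !(c == '-' || c == '.'))
        = (PySem.Str.upper raw_sequence).toList.filter
          (fun c => !PySem.Chars.isspace c && !(c == '-' || c == '.')) := by
      rw [List.filter_filter]
      exact List.filter_congr (fun c _ => by cases PySem.Chars.isspace c <;> simp)
    have e2 : ((PySem.Str.upper raw_sequence).toList.filter (fun c => !PySem.Chars.isspace c)).any
          (fun c => !PySem.Chars.isspace c && (c == '-' || c == '.'))
        = (PySem.Str.upper raw_sequence).toList.any
          (fun c => !PySem.Chars.isspace c && (c == '-' || c == '.')) := by
      rw [pvAny_filter]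
      exact pvAny_congr _ (fun c _ => by cases PySem.Chars.isspace c <;> simp)
    rw [e1, e2]
  · have hs' : (PySem.Str.upper raw_sequence).toList.any (fun c => PySem.Chars.isspace c) = false := by
      simpa using hs
    rw [if_neg hs]
    have hofl : (PySem.Str.upper raw_sequence, ([] : List String))
        = (String.ofList (PySem.Str.upper raw_sequence).toList, ([] : List String)) := by
      rw [String.ofList_toList]
    rw [hofl]
    exact pvCore _ hs'

-- ===== VERDICT (by name: the statement is the Claim_ definition above) =====
theorem sanitize_sequence_py_spec : Claim_equal_sanitize_sequence_py := by
  intro raw_sequence _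
  unfold Spec_sanitize_sequence_py sanitize_sequence_py_alt
  rw [pvA_eq, pvFold_char]
  simp
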